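-- pv_equiv track=rewrite | github.com/TheTopLuca/leftRecurstionLeftFactoringElimination | task_4_2.py | selectAGoodString
-- ===== SOURCE A (Python) =====
-- def findCommonPrefixes(string , arr):
--     out = []
--     for item in arr:
--         if item == string:
--             out.insert(arr.index(item),"")
--         else:
--             match = ""
--             i = 0
--             length = len(item)
--             while(i<length):
--                 if(i<len(string) and item[i]==string[i]):
--                     match = match+item[i]
--                 else:
--                     break
--                 i+=1
--             out.append(match)
--     return out
--
-- def findLengthOfCommonPrefix(arr):
--     number = 0
--     for item in arr:
--         if not item=="":
--             number+=1
--     return number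
--
-- def selectAGoodString(arr):
--     output = ""
--     for item in arr :
--         output = item
--         currentPrefixArray = findCommonPrefixes(item,arr)
--         if(findLengthOfCommonPrefix(currentPrefixArray)>0):
--             return output
--     return output
-- ===== SOURCE B (Python) =====
-- def selectAGoodString(arr):
--     # Bucket the distinct nonempty values by first character (one pass),
--     # then return the first item whose bucket holds another distinct value.
--     buckets = {}
--     for s in arr:
--         if s:
--             buckets.setdefault(s[0], set()).add(s)
--     output = ""
--     for item in arr:
--         output = item
--         if item and len(buckets[item[0]]) > 1:
--             return output
--     return output
-- ===== Notes on version B (the rewrite author's own statement) =====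
-- stated objective: faster
-- what changed: A re-scans the whole array for every item (building all pairwise common prefixes and counting the nonempty ones); B builds, in one pass, a dict from first character to the set of distinct nonempty values, then a second pass returns the first item whose bucket contains a second distinct value.
import Mathlib
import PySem

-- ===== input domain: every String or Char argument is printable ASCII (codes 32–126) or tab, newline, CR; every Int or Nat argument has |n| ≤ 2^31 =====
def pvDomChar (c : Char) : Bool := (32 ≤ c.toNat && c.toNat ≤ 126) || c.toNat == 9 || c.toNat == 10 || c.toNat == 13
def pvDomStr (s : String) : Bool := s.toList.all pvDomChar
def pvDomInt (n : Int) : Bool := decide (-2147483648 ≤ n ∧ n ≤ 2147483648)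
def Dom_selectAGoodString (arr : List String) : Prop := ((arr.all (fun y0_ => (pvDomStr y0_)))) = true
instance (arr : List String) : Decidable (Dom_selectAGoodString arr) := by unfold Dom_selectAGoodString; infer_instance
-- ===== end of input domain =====

-- B replaces A's quadratic all-pairs prefix scan by one pass that buckets the distinct
-- nonempty values by first character and one pass that reads the buckets (objective: faster).

-- ===== PORT A =====
-- the while loop of findCommonPrefixes: builds the common prefix of item and string char by char
def pvLcpAux (item string : List Char) (i : Nat) (m : List Char) : List Char :=
  if h : i < item.length then
    if h2 : i < string.length then
      if item[i] = string[i] then pvLcpAux item string (i + 1) (m ++ [item[i]])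
      else m
    else m
  else m
termination_by item.length - i

def findCommonPrefixes (string : String) (arr : List String) : List String :=
  arr.foldl
    (fun out item =>
      if item = string then
        -- arr.index(item) never raises here: item was taken from arr
        PySem.List.insert out (((PySem.List.index? arr item).getD 0 : Nat) : Int) ""
      else
        out ++ [String.ofList (pvLcpAux item.toList string.toList 0 [])])
    []

def findLengthOfCommonPrefix (arr : List String) : Int :=
  arr.foldl (fun number item => if ¬ (item = "") then number + 1 else number) 0

def pvSelectLoopA (arr : List String) : List String → String → String
  | [], output => output
  | item :: rest, _ =>
    if findLengthOfCommonPrefix (findCommonPrefixes item arr) > 0 then item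
    else pvSelectLoopA arr rest item

def selectAGoodString (arr : List String) : String := pvSelectLoopA arr arr ""

-- ===== PORT B =====
-- buckets: first character ↦ set of the distinct nonempty strings of arr starting with it
def pvBuildBuckets (arr : List String) : PySem.Dict Char (PySem.Set String) :=
  arr.foldl
    (fun b s =>
      match s.toList with
      | [] => b
      | c :: _ => b.insert c (PySem.Set.add (b.getD c PySem.Set.empty) s))
    PySem.Dict.empty

def pvSelectLoopB (b : PySem.Dict Char (PySem.Set String)) : List String → String → String
  | [], output => output
  | item :: rest, _ =>
    match item.toList with
    | [] => pvSelectLoopB b rest item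
    | c :: _ =>
      if PySem.Set.len (b.getD c PySem.Set.empty) > 1 then item
      else pvSelectLoopB b rest item

def selectAGoodString_alt (arr : List String) : String :=
  pvSelectLoopB (pvBuildBuckets arr) arr ""

-- ===== PRECONDITION & SPEC =====
def Spec_selectAGoodString (arr : List String) (out : String) : Prop := out = selectAGoodString_alt arr
instance (arr : List String) (out : String) : Decidable (Spec_selectAGoodString arr out) := by unfold Spec_selectAGoodString; infer_instance

-- ===== CLAIM (what is proved, stated in full; the proofs are below) =====
def Claim_equal_selectAGoodString : Prop := ∀ (arr : List String), Dom_selectAGoodString arr → Spec_selectAGoodString arr (selectAGoodString arr)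

-- ===== LEMMAS AND PROOFS =====

-- the while loop only extends its accumulator
theorem pvLcpAux_append (item string : List Char) (i : Nat) (m : List Char) :
    ∃ t, pvLcpAux item string i m = m ++ t := by
  generalize hn : item.length - i = n
  induction n generalizing i m with
  | zero =>
    rw [pvLcpAux]
    have h : ¬ i < item.length := by omega
    rw [dif_neg h]
    exact ⟨[], by simp⟩
  | succ n ih =>
    rw [pvLcpAux]
    by_cases h : i < item.length
    · rw [dif_pos h]
      by_cases h2 : i < string.length
      · rw [dif_pos h2]
        by_cases h3 : item[i] = string[i]
        · rw [if_pos h3]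
          obtain ⟨t, ht⟩ := ih (i + 1) (m ++ [item[i]]) (by omega)
          exact ⟨item[i] :: t, by rw [ht]; simp⟩
        · rw [if_neg h3]; exact ⟨[], by simp⟩
      · rw [dif_neg h2]; exact ⟨[], by simp⟩
    · rw [dif_neg h]; exact ⟨[], by simp⟩

-- nonemptiness of the common prefix = both nonempty with equal first character
theorem pvLcpAux_ne_nil (a b : List Char) :
    pvLcpAux a b 0 [] ≠ [] ↔ a ≠ [] ∧ b ≠ [] ∧ a.head? = b.head? := by
  cases a with
  | nil => rw [pvLcpAux]; simp
  | cons x xs =>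
    cases b with
    | nil =>
      rw [pvLcpAux]
      rw [dif_pos (by simp : 0 < (x :: xs).length)]
      rw [dif_neg (by simp : ¬ 0 < ([] : List Char).length)]
      simp
    | cons y ys =>
      rw [pvLcpAux]
      rw [dif_pos (by simp : 0 < (x :: xs).length), dif_pos (by simp : 0 < (y :: ys).length)]
      by_cases h3 : (x :: xs)[0] = (y :: ys)[0]
      · rw [if_pos h3]
        obtain ⟨t, ht⟩ := pvLcpAux_append (x :: xs) (y :: ys) (0 + 1) ([] ++ [(x :: xs)[0]])
        rw [ht]
        simp at h3
        simp [h3]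
      · rw [if_neg h3]
        simp at h3
        simp [h3]

-- Python list.insert as a multiset operation
theorem pv_mem_insert {α : Type} (xs : List α) (i : Int) (v x : α) :
    x ∈ PySem.List.insert xs i v ↔ x = v ∨ x ∈ xs := by
  unfold PySem.List.insert
  rcases hk : PySem.List.sliceIndices xs.length (some i) none 1 with ⟨k, f, s⟩
  simp only
  constructor
  · intro hx
    rcases List.mem_append.1 hx with hx | hx
    · exact Or.inr (List.mem_of_mem_take hx)
    · rcases List.mem_cons.1 hx with hx | hx
      · exact Or.inl hx
      · exact Or.inr (List.mem_of_mem_drop hx)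
  · intro hx
    rcases hx with rfl | hx
    · simp
    · conv at hx => rw [← List.take_append_drop k.toNat xs]
      rcases List.mem_append.1 hx with hx | hx <;> simp [List.mem_append, hx]

theorem pv_flcp_pos (out : List String) :
    findLengthOfCommonPrefix out > 0 ↔ ∃ x ∈ out, x ≠ "" := by
  unfold findLengthOfCommonPrefix
  rw [PySem.List.foldl_ite_add_one (p := fun item => ¬ (item = ""))]
  simp [List.countP_pos_iff]

-- String.ofList w = "" iff w = []
theorem pv_ofList_eq_empty (w : List Char) : String.ofList w = "" ↔ w = [] := by
  constructor
  · intro h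
    have := congrArg String.toList h
    simpa using this
  · rintro rfl; rfl

-- the fold of findCommonPrefixes, generalised over the accumulator
theorem pv_fcp_fold (string : String) (arr : List String) (l : List String) (acc : List String) :
    (∃ x ∈ l.foldl
        (fun out item =>
          if item = string then
            PySem.List.insert out (((PySem.List.index? arr item).getD 0 : Nat) : Int) ""
          else
            out ++ [String.ofList (pvLcpAux item.toList string.toList 0 [])]) acc, x ≠ "") ↔
      (∃ x ∈ acc, x ≠ "") ∨
        (∃ s ∈ l, s ≠ string ∧ pvLcpAux s.toList string.toList 0 [] ≠ []) := by
  induction l generalizing acc with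
  | nil => simp
  | cons s l ih =>
    simp only [List.foldl_cons]
    by_cases hs : s = string
    · rw [if_pos hs]
      rw [ih]
      have hins : (∃ x ∈ PySem.List.insert acc (((PySem.List.index? arr s).getD 0 : Nat) : Int) "", x ≠ "") ↔
          (∃ x ∈ acc, x ≠ "") := by
        constructor
        · rintro ⟨x, hx, hne⟩
          rcases (pv_mem_insert _ _ _ _).1 hx with rfl | hx
          · exact absurd rfl hne
          · exact ⟨x, hx, hne⟩
        · rintro ⟨x, hx, hne⟩
          exact ⟨x, (pv_mem_insert _ _ _ _).2 (Or.inr hx), hne⟩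
      rw [hins]
      subst hs
      simp only [List.mem_cons]
      constructor
      · rintro (h | ⟨t, ht, hts, htn⟩)
        · exact Or.inl h
        · exact Or.inr ⟨t, Or.inr ht, hts, htn⟩
      · rintro (h | ⟨t, (rfl | ht), hts, htn⟩)
        · exact Or.inl h
        · exact absurd rfl hts
        · exact Or.inr ⟨t, ht, hts, htn⟩
    · rw [if_neg hs]
      rw [ih]
      have happ : (∃ x ∈ acc ++ [String.ofList (pvLcpAux s.toList string.toList 0 [])], x ≠ "") ↔
          (∃ x ∈ acc, x ≠ "") ∨ pvLcpAux s.toList string.toList 0 [] ≠ [] := by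
        simp only [List.mem_append, List.mem_singleton]
        constructor
        · rintro ⟨x, hx | rfl, hne⟩
          · exact Or.inl ⟨x, hx, hne⟩
          · exact Or.inr (fun h => hne ((pv_ofList_eq_empty _).2 h))
        · rintro (⟨x, hx, hne⟩ | hne)
          · exact ⟨x, Or.inl hx, hne⟩
          · exact ⟨_, Or.inr rfl, fun h => hne ((pv_ofList_eq_empty _).1 h)⟩
      rw [happ]
      simp only [List.mem_cons]
      constructor
      · rintro ((h | hne) | ⟨t, ht, hts, htn⟩)
        · exact Or.inl h
        · exact Or.inr ⟨s, Or.inl rfl, hs, hne⟩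
        · exact Or.inr ⟨t, Or.inr ht, hts, htn⟩
      · rintro (h | ⟨t, (rfl | ht), hts, htn⟩)
        · exact Or.inl (Or.inl h)
        · exact Or.inl (Or.inr htn)
        · exact Or.inr ⟨t, ht, hts, htn⟩

-- A's good-string test, characterised
theorem pv_condA (string : String) (arr : List String) :
    findLengthOfCommonPrefix (findCommonPrefixes string arr) > 0 ↔
      ∃ s ∈ arr, s ≠ string ∧ s.toList ≠ [] ∧ string.toList ≠ [] ∧
        s.toList.head? = string.toList.head? := by
  rw [pv_flcp_pos]
  unfold findCommonPrefixes
  rw [pv_fcp_fold]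
  simp only [List.not_mem_nil, false_and, exists_false, false_or]
  constructor
  · rintro ⟨s, hs, hne, hlcp⟩
    obtain ⟨ha, hb, hh⟩ := (pvLcpAux_ne_nil _ _).1 hlcp
    exact ⟨s, hs, hne, ha, hb, hh⟩
  · rintro ⟨s, hs, hne, ha, hb, hh⟩
    exact ⟨s, hs, hne, (pvLcpAux_ne_nil _ _).2 ⟨ha, hb, hh⟩⟩

-- the bucket invariant: membership and distinctness of every bucket
theorem pv_buckets_inv (l : List String) (d : PySem.Dict Char (PySem.Set String))
    (hd : ∀ c, ((d.getD c PySem.Set.empty : List String)).Nodup) (c : Char) :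
    (((l.foldl
        (fun b s =>
          match s.toList with
          | [] => b
          | c :: _ => b.insert c (PySem.Set.add (b.getD c PySem.Set.empty) s))
        d).getD c PySem.Set.empty : List String)).Nodup ∧
    (∀ x, x ∈ ((l.foldl
        (fun b s =>
          match s.toList with
          | [] => b
          | c :: _ => b.insert c (PySem.Set.add (b.getD c PySem.Set.empty) s))
        d).getD c PySem.Set.empty : List String) ↔
      x ∈ (d.getD c PySem.Set.empty : List String) ∨ (x ∈ l ∧ x.toList.head? = some c)) := by
  induction l generalizing d with
  | nil => exact ⟨hd c, fun x => by simp⟩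
  | cons s l ih =>
    simp only [List.foldl_cons]
    cases hs : s.toList with
    | nil =>
      obtain ⟨hnd, hmem⟩ := ih d hd
      refine ⟨hnd, fun x => Iff.trans (hmem x) ?_⟩
      simp only [List.mem_cons]
      constructor
      · rintro (h | ⟨hx, hh⟩)
        · exact Or.inl h
        · exact Or.inr ⟨Or.inr hx, hh⟩
      · rintro (h | ⟨(rfl | hx), hh⟩)
        · exact Or.inl h
        · rw [hs] at hh; cases hh
        · exact Or.inr ⟨hx, hh⟩
    | cons c0 t0 =>
      have hd' : ∀ c', (((d.insert c0 (PySem.Set.add (d.getD c0 PySem.Set.empty) s)).getD c' PySem.Set.empty : List String)).Nodup := by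
        intro c'
        rw [PySem.Dict.getD_insert]
        by_cases hc' : c' = c0
        · rw [if_pos hc']
          exact PySem.Set.nodup_add _ _ (hd c0)
        · rw [if_neg hc']
          exact hd c'
      obtain ⟨hnd, hmem⟩ := ih (d.insert c0 (PySem.Set.add (d.getD c0 PySem.Set.empty) s)) hd'
      refine ⟨hnd, fun x => Iff.trans (hmem x) ?_⟩
      rw [PySem.Dict.getD_insert]
      by_cases hc : c = c0
      · rw [if_pos hc]
        rw [PySem.Set.mem_add]
        subst hc
        simp only [List.mem_cons]
        constructor
        · rintro ((h | rfl) | ⟨hx, hh⟩)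
          · exact Or.inl h
          · exact Or.inr ⟨Or.inl rfl, by rw [hs]; rfl⟩
          · exact Or.inr ⟨Or.inr hx, hh⟩
        · rintro (h | ⟨(rfl | hx), hh⟩)
          · exact Or.inl (Or.inl h)
          · exact Or.inl (Or.inr rfl)
          · exact Or.inr ⟨hx, hh⟩
      · rw [if_neg hc]
        simp only [List.mem_cons]
        constructor
        · rintro (h | ⟨hx, hh⟩)
          · exact Or.inl h
          · exact Or.inr ⟨Or.inr hx, hh⟩
        · rintro (h | ⟨(rfl | hx), hh⟩)
          · exact Or.inl h
          · rw [hs] at hh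
            simp only [List.head?_cons, Option.some.injEq] at hh
            exact absurd hh.symm hc
          · exact Or.inr ⟨hx, hh⟩

-- a duplicate-free list containing a has length > 1 iff it has an element ≠ a
theorem pv_len_gt_one {α : Type} (L : List α) (a : α) (hnd : L.Nodup) (ha : a ∈ L) :
    (1 : Int) < (L.length : Int) ↔ ∃ b ∈ L, b ≠ a := by
  rw [show ((1 : Int) < (L.length : Int)) ↔ 1 < L.length from by exact_mod_cast Iff.rfl]
  constructor
  · intro h
    cases L with
    | nil => cases ha
    | cons x L' =>
      cases L' with
      | nil => simp at h
      | cons y t =>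
        by_cases hxa : x = a
        · refine ⟨y, by simp, ?_⟩
          subst hxa
          have hx : x ∉ y :: t := (List.nodup_cons.1 hnd).1
          intro hya
          apply hx
          rw [hya]
          exact List.mem_cons_self ..
        · exact ⟨x, by simp, hxa⟩
  · rintro ⟨b, hb, hba⟩
    cases L with
    | nil => cases ha
    | cons x L' =>
      cases L' with
      | nil =>
        simp at ha hb
        exact absurd (hb.trans ha.symm) hba
      | cons y t => simp

-- the buckets of B: bucket c holds exactly the distinct nonempty strings of arr starting with c
theorem pv_bucket_mem (arr : List String) (c : Char) :
    (((pvBuildBuckets arr).getD c PySem.Set.empty : List String)).Nodup ∧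
    (∀ x, x ∈ ((pvBuildBuckets arr).getD c PySem.Set.empty : List String) ↔
      x ∈ arr ∧ x.toList.head? = some c) := by
  obtain ⟨hnd, hm⟩ := pv_buckets_inv arr PySem.Dict.empty (fun _ => List.nodup_nil) c
  refine ⟨hnd, fun x => Iff.trans (hm x) ?_⟩
  constructor
  · rintro (h | h)
    · cases h
    · exact h
  · exact Or.inr

-- B's good-string test, characterised (for item ∈ arr with first char c)
theorem pv_condB (arr : List String) (item : String) (c : Char) (t : List Char)
    (hmem : item ∈ arr) (hc : item.toList = c :: t) :
    PySem.Set.len ((pvBuildBuckets arr).getD c PySem.Set.empty) > 1 ↔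
      ∃ s ∈ arr, s ≠ item ∧ s.toList ≠ [] ∧ s.toList.head? = item.toList.head? := by
  obtain ⟨hnd, hm⟩ := pv_bucket_mem arr c
  have hitem : item ∈ ((pvBuildBuckets arr).getD c PySem.Set.empty : List String) :=
    (hm item).2 ⟨hmem, by rw [hc]; rfl⟩
  have hlen := pv_len_gt_one ((pvBuildBuckets arr).getD c PySem.Set.empty : List String) item hnd hitem
  constructor
  · intro h
    obtain ⟨b, hb, hba⟩ := hlen.1 h
    obtain ⟨hbarr, hbh⟩ := (hm b).1 hb
    refine ⟨b, hbarr, hba, ?_, ?_⟩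
    · intro hnil; rw [hnil] at hbh; cases hbh
    · rw [hbh, hc]; rfl
  · rintro ⟨s, hs, hsi, hsn, hsh⟩
    refine hlen.2 ⟨s, (hm s).2 ⟨hs, ?_⟩, hsi⟩
    rw [hsh, hc]; rfl

theorem pv_loops_eq (arr : List String) (l : List String) (out : String)
    (hl : ∀ item ∈ l, item ∈ arr) :
    pvSelectLoopA arr l out = pvSelectLoopB (pvBuildBuckets arr) l out := by
  induction l generalizing out with
  | nil => rfl
  | cons item rest ih =>
    have hmem : item ∈ arr := hl item (List.mem_cons_self ..)
    have hl' : ∀ x ∈ rest, x ∈ arr := fun x hx => hl x (List.mem_cons_of_mem _ hx)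
    rw [pvSelectLoopA, pvSelectLoopB]
    cases hc : item.toList with
    | nil =>
      have hA : ¬ findLengthOfCommonPrefix (findCommonPrefixes item arr) > 0 := by
        rw [pv_condA]
        rintro ⟨s, _, _, _, hitem, _⟩
        exact hitem hc
      rw [if_neg hA]
      exact ih item hl'
    | cons c t =>
      show (if findLengthOfCommonPrefix (findCommonPrefixes item arr) > 0 then item
            else pvSelectLoopA arr rest item) =
          (if PySem.Set.len ((pvBuildBuckets arr).getD c PySem.Set.empty) > 1 then item
            else pvSelectLoopB (pvBuildBuckets arr) rest item)
      have hiff : findLengthOfCommonPrefix (findCommonPrefixes item arr) > 0 ↔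
          PySem.Set.len ((pvBuildBuckets arr).getD c PySem.Set.empty) > 1 := by
        rw [pv_condA, pv_condB arr item c t hmem hc]
        constructor
        · rintro ⟨s, hs, hsi, hsn, _, hsh⟩
          exact ⟨s, hs, hsi, hsn, hsh⟩
        · rintro ⟨s, hs, hsi, hsn, hsh⟩
          exact ⟨s, hs, hsi, hsn, by rw [hc]; simp, hsh⟩
      by_cases h : findLengthOfCommonPrefix (findCommonPrefixes item arr) > 0
      · rw [if_pos h, if_pos (hiff.1 h)]
      · rw [if_neg h, if_neg (fun hb => h (hiff.2 hb))]
        exact ih item hl'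

-- ===== VERDICT (by name: the statement is the Claim_ definition above) =====
theorem selectAGoodString_spec : Claim_equal_selectAGoodString := by
  intro arr _
  unfold Spec_selectAGoodString selectAGoodString selectAGoodString_alt
  exact pv_loops_eq arr arr "" (fun _ h => h)
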